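-- pv_equiv track=rewrite | github.com/ElizabethViera/AdventOfCode | AdventOfCode2015/Day 19/Day19.py | replaceKeyWithValueAll
-- ===== SOURCE A (Python) =====
-- def replaceKeyWithValueAll(stringToBeReplaced, key, value):
--     segments = stringToBeReplaced.split(key)
--     results = set()
--     if len(segments) > 1:
--         for segment in range(1, len(segments)):
--             fixedResult = key.join(segments[:segment])
--             unfixedResult = value + key.join(segments[segment:])
--             results.add((fixedResult, unfixedResult))
--     return results
-- ===== SOURCE B (Python) =====
-- def replaceKeyWithValueAll(stringToBeReplaced, key, value):
--     # scan with str.find instead of split/join; an empty separator is an error, as for split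
--     if key == "":
--         raise ValueError("empty separator")
--     results = set()
--     k = len(key)
--     i = stringToBeReplaced.find(key)
--     while i != -1:
--         results.add((stringToBeReplaced[:i], value + stringToBeReplaced[i + k:]))
--         i = stringToBeReplaced.find(key, i + k)
--     return results
-- ===== Notes on version B (the rewrite author's own statement) =====
-- stated objective: alternative
-- what changed: Instead of splitting the string on the key and re-joining prefix and suffix segment lists for every split point, B scans the string once with str.find and slices the prefix and suffix directly at each non-overlapping occurrence.
import Mathlib
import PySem

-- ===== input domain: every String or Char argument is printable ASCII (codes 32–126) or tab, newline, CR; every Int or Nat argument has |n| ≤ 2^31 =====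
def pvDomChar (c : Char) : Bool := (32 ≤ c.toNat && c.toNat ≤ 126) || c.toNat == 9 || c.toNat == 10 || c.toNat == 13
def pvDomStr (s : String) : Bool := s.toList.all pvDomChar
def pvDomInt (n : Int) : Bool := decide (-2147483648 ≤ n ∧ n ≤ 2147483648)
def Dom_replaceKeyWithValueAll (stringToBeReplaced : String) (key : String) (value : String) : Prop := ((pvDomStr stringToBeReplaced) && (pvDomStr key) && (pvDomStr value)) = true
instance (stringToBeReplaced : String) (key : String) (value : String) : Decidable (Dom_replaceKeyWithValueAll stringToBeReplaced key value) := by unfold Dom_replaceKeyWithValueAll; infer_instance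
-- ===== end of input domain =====

-- B replaces the split/re-join construction by a single str.find scan that slices prefix and suffix at each occurrence (an alternative decomposition; A raises ValueError on key="", excluded by Pre_, where B raises too).


-- ===== PORT A =====
def replaceKeyWithValueAll (stringToBeReplaced : String) (key : String) (value : String) : List (String × String) :=
  match PySem.Chars.split? stringToBeReplaced.toList key.toList with
  | none => []  -- Python raises ValueError("empty separator") here; excluded by Pre_
  | some segments =>
    if 1 < segments.length then
      (PySem.List.pyRange 1 (segments.length : Int) 1).foldl
        (fun results segment =>
          PySem.Set.add results
            (String.ofList (PySem.Chars.join key.toList (PySem.List.slice segments none (some segment))),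
             String.ofList (value.toList ++ PySem.Chars.join key.toList (PySem.List.slice segments (some segment) none))))
        ([] : PySem.Set (String × String))
    else ([] : PySem.Set (String × String))

-- ===== PORT B =====
def rkwvGo (s key value : List Char) : Nat → Int → PySem.Set (String × String) → PySem.Set (String × String)
  | 0, _, acc => acc
  | fuel+1, i, acc =>
    if i = -1 then acc
    else rkwvGo s key value fuel (PySem.Chars.findFrom s key (i + (key.length : Int)))
      (PySem.Set.add acc
        (String.ofList (PySem.List.slice s none (some i)),
         String.ofList (value ++ PySem.List.slice s (some (i + (key.length : Int))) none)))

def replaceKeyWithValueAll_alt (stringToBeReplaced : String) (key : String) (value : String) : List (String × String) :=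
  if key = "" then []  -- Source B raises ValueError here; excluded by Pre_
  else rkwvGo stringToBeReplaced.toList key.toList value.toList
        (stringToBeReplaced.toList.length + 1)
        (PySem.Chars.find stringToBeReplaced.toList key.toList)
        ([] : PySem.Set (String × String))

-- ===== PRECONDITION & SPEC =====
-- Pre_: A raises ValueError (str.split with an empty separator) when key = ""; nothing else raises.
def Pre_replaceKeyWithValueAll (stringToBeReplaced : String) (key : String) (value : String) : Prop := key ≠ ""
instance (stringToBeReplaced : String) (key : String) (value : String) : Decidable (Pre_replaceKeyWithValueAll stringToBeReplaced key value) := by unfold Pre_replaceKeyWithValueAll; infer_instance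
def pvWitness_replaceKeyWithValueAll : String × String × String := ("HOHOH", "O", "Mg")

def Spec_replaceKeyWithValueAll (stringToBeReplaced : String) (key : String) (value : String) (out : List (String × String)) : Prop := out = replaceKeyWithValueAll_alt stringToBeReplaced key value
instance (stringToBeReplaced : String) (key : String) (value : String) (out : List (String × String)) : Decidable (Spec_replaceKeyWithValueAll stringToBeReplaced key value out) := by unfold Spec_replaceKeyWithValueAll; infer_instance

-- ===== CLAIM (what is proved, stated in full; the proofs are below) =====
def Claim_equal_replaceKeyWithValueAll : Prop := ∀ (stringToBeReplaced : String) (key : String) (value : String), Dom_replaceKeyWithValueAll stringToBeReplaced key value → Pre_replaceKeyWithValueAll stringToBeReplaced key value → Spec_replaceKeyWithValueAll stringToBeReplaced key value (replaceKeyWithValueAll stringToBeReplaced key value)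

-- ===== LEMMAS AND PROOFS =====

-- proof-only helpers: a clean fuel-indexed version of split, and the pair stream both programs generate
def rkwvSegs (key : List Char) : Nat → List Char → List (List Char)
  | 0, l => [l]
  | _+1, [] => [[]]
  | f+1, c :: rest =>
    if key.isPrefixOf (c :: rest) then
      [] :: rkwvSegs key f ((c :: rest).drop key.length)
    else
      match rkwvSegs key f rest with
      | [] => [[c]]
      | h :: t => (c :: h) :: t

def rkwvPairs (key : List Char) : Nat → List Char → List Char → List (List Char × List Char)
  | 0, _, _ => []
  | _+1, _, [] => []
  | f+1, pre, c :: rest =>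
    if key.isPrefixOf (c :: rest) then
      (pre, (c :: rest).drop key.length) :: rkwvPairs key f (pre ++ key) ((c :: rest).drop key.length)
    else rkwvPairs key f (pre ++ [c]) rest

def rkwvMkP (value : List Char) (p : List Char × List Char) : String × String :=
  (String.ofList p.1, String.ofList (value ++ p.2))

theorem rkwvSegs_ne_nil (key : List Char) (f : Nat) (l : List Char) : rkwvSegs key f l ≠ [] := by
  match f, l with
  | 0, l => simp [rkwvSegs]
  | _+1, [] => simp [rkwvSegs]
  | f+1, c :: rest =>
    simp only [rkwvSegs]
    split
    · simp
    · split <;> simp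

theorem rkwvSegs_cons (key : List Char) (f : Nat) (l : List Char) :
    ∃ h t, rkwvSegs key f l = h :: t := by
  cases hs : rkwvSegs key f l with
  | nil => exact absurd hs (rkwvSegs_ne_nil key f l)
  | cons h t => exact ⟨h, t, rfl⟩

theorem rkwv_join_cons_head (key : List Char) (c : Char) (h : List Char) (t : List (List Char)) :
    PySem.Chars.join key ((c :: h) :: t) = c :: PySem.Chars.join key (h :: t) := by
  cases t with
  | nil => simp [PySem.Chars.join_singleton]
  | cons q t' => simp [PySem.Chars.join_cons_cons]

theorem rkwv_join_segs (key : List Char) (f : Nat) (l : List Char) :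
    PySem.Chars.join key (rkwvSegs key f l) = l := by
  induction f generalizing l with
  | zero => simp [rkwvSegs, PySem.Chars.join_singleton]
  | succ f ih =>
    match l with
    | [] => simp [rkwvSegs, PySem.Chars.join_singleton]
    | c :: rest =>
      simp only [rkwvSegs]
      by_cases hp : key.isPrefixOf (c :: rest)
      · simp only [if_pos hp]
        obtain ⟨h, t, hht⟩ := rkwvSegs_cons key f ((c :: rest).drop key.length)
        have hpre : key <+: (c :: rest) := List.isPrefixOf_iff_prefix.mp hp
        have := ih ((c :: rest).drop key.length)
        rw [hht] at this ⊢
        rw [PySem.Chars.join_cons_cons, this]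
        simpa using List.prefix_iff_eq_append.mp hpre
      · simp only [if_neg hp]
        obtain ⟨h, t, hht⟩ := rkwvSegs_cons key f rest
        have := ih rest
        rw [hht] at this ⊢
        rw [rkwv_join_cons_head, this]

theorem rkwv_go_eq (key : List Char) (f : Nat) (l cur : List Char) (acc : List (List Char)) :
    PySem.Chars.splitOn.go key f l cur acc
      = acc.reverse ++ (rkwvSegs key f l).modifyHead (cur.reverse ++ ·) := by
  induction f generalizing l cur acc with
  | zero => simp [PySem.Chars.splitOn.go, rkwvSegs]
  | succ f ih =>
    match l with
    | [] => simp [PySem.Chars.splitOn.go, rkwvSegs]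
    | c :: rest =>
      rw [PySem.Chars.splitOn.go]
      by_cases hp : key.isPrefixOf (c :: rest)
      · have hp' : key <+: (c :: rest) := List.isPrefixOf_iff_prefix.mp hp
        simp only [if_pos hp]
        rw [ih]
        obtain ⟨h, t, hht⟩ := rkwvSegs_cons key f ((c :: rest).drop key.length)
        simp [rkwvSegs, hp', hht, List.modifyHead]
      · have hp' : ¬ key <+: (c :: rest) := fun hc => hp (List.isPrefixOf_iff_prefix.mpr hc)
        simp only [if_neg hp]
        rw [ih]
        obtain ⟨h, t, hht⟩ := rkwvSegs_cons key f rest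
        simp [rkwvSegs, hp', hht, List.modifyHead]

theorem rkwv_splitOn_eq (key l : List Char) :
    PySem.Chars.splitOn l key = rkwvSegs key (l.length + 1) l := by
  rw [PySem.Chars.splitOn, rkwv_go_eq]
  obtain ⟨h, t, hht⟩ := rkwvSegs_cons key (l.length + 1) l
  simp [hht, List.modifyHead]

theorem rkwv_range'_shift {α : Type} (a n : Nat) (g : Nat → α) :
    (List.range' (a + 1) n).map g = (List.range' a n).map (fun j => g (j + 1)) := by
  induction n generalizing a with
  | zero => simp
  | succ n ih => simp [List.range'_succ, ih]

theorem rkwv_link (key : List Char) (f : Nat) (l pre : List Char) :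
    rkwvPairs key f pre l
      = (List.range' 1 ((rkwvSegs key f l).length - 1)).map
          (fun j => (pre ++ PySem.Chars.join key ((rkwvSegs key f l).take j),
                     PySem.Chars.join key ((rkwvSegs key f l).drop j))) := by
  induction f generalizing l pre with
  | zero => simp [rkwvPairs, rkwvSegs]
  | succ f ih =>
    match l with
    | [] => simp [rkwvPairs, rkwvSegs]
    | c :: rest =>
      by_cases hp : key.isPrefixOf (c :: rest)
      · obtain ⟨h', t', hht⟩ := rkwvSegs_cons key f ((c :: rest).drop key.length)
        simp only [rkwvPairs, rkwvSegs, if_pos hp, hht]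
        rw [ih ((c :: rest).drop key.length) (pre ++ key), hht]
        simp only [List.length_cons, Nat.add_sub_cancel]
        rw [List.range'_succ]
        simp only [List.map_cons]
        congr 1
        · simp only [List.take_succ_cons, List.take_zero, List.drop_succ_cons, List.drop_zero]
          rw [PySem.Chars.join_singleton]
          have hjoin : PySem.Chars.join key (h' :: t') = (c :: rest).drop key.length := by
            rw [← hht]; exact rkwv_join_segs key f _
          simp [hjoin]
        · rw [rkwv_range'_shift 1 t'.length
            (fun j => (pre ++ PySem.Chars.join key (List.take j ([] :: h' :: t')),
                       PySem.Chars.join key (List.drop j ([] :: h' :: t'))))]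
          apply List.map_congr_left
          intro j hj
          have hj1 : 1 ≤ j := (List.mem_range'_1.mp hj).1
          obtain ⟨j', rfl⟩ := Nat.exists_eq_add_of_le hj1
          rw [show 1 + j' = j' + 1 by omega]
          simp only [List.take_succ_cons]
          rw [PySem.Chars.join_cons_cons]
          simp [List.append_assoc]
      · obtain ⟨h', t', hht⟩ := rkwvSegs_cons key f rest
        simp only [rkwvPairs, rkwvSegs, if_neg hp, hht]
        rw [ih rest (pre ++ [c]), hht]
        apply List.map_congr_left
        intro j hj
        have hj1 : 1 ≤ j := (List.mem_range'_1.mp hj).1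
        obtain ⟨j', rfl⟩ := Nat.exists_eq_add_of_le hj1
        rw [show 1 + j' = j' + 1 by omega]
        simp only [List.take_succ_cons, List.drop_succ_cons]
        rw [rkwv_join_cons_head]
        simp [List.append_assoc]

theorem rkwv_pairs_nil_l (key : List Char) (f : Nat) (pre : List Char) :
    rkwvPairs key f pre [] = [] := by
  cases f <;> simp [rkwvPairs]

theorem rkwv_pairs_fuel_norm (key : List Char) (hk : key ≠ []) :
    ∀ (n : Nat) (l : List Char), l.length ≤ n → ∀ (f : Nat) (pre : List Char), l.length ≤ f →
      rkwvPairs key f pre l = rkwvPairs key l.length pre l := by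
  intro n
  induction n with
  | zero =>
    intro l hl f pre hf
    have : l = [] := List.length_eq_zero_iff.mp (Nat.le_zero.mp hl)
    subst this
    simp [rkwv_pairs_nil_l]
  | succ n ih =>
    intro l hl f pre hf
    match l with
    | [] => simp [rkwv_pairs_nil_l]
    | c :: rest =>
      have hkl : 1 ≤ key.length := Nat.one_le_iff_ne_zero.mpr (by simpa using hk)
      obtain ⟨f', rfl⟩ : ∃ f', f = f' + 1 := by
        cases f with
        | zero => simp at hf
        | succ f' => exact ⟨f', rfl⟩
      have hl' : rest.length ≤ n := by simp only [List.length_cons] at hl; omega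
      have hf' : rest.length ≤ f' := by simp only [List.length_cons] at hf; omega
      have hdl : ((c :: rest).drop key.length).length ≤ rest.length := by
        simp only [List.length_drop, List.length_cons]; omega
      simp only [List.length_cons, rkwvPairs]
      by_cases hp : key.isPrefixOf (c :: rest)
      · simp only [if_pos hp]
        have h1 := ih ((c :: rest).drop key.length) (by omega) f' (pre ++ key) (by omega)
        have h2 := ih ((c :: rest).drop key.length) (by omega) rest.length (pre ++ key) (by omega)
        rw [h1, h2]
      · simp only [if_neg hp]
        have h1 := ih rest (by omega) f' (pre ++ [c]) (by omega)
        have h2 := ih rest (by omega) rest.length (pre ++ [c]) le_rfl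
        rw [h1, h2]

theorem rkwv_pairs_fuel (key : List Char) (hk : key ≠ []) :
    ∀ (f f' : Nat) (pre l : List Char), l.length ≤ f → l.length ≤ f' →
      rkwvPairs key f pre l = rkwvPairs key f' pre l := by
  intro f f' pre l hf hf'
  rw [rkwv_pairs_fuel_norm key hk l.length l le_rfl f pre hf,
      rkwv_pairs_fuel_norm key hk l.length l le_rfl f' pre hf']

theorem rkwv_pairs_no_occ (key : List Char) (f : Nat) (pre l : List Char)
    (h : ∀ p, ¬ key <+: l.drop p) : rkwvPairs key f pre l = [] := by
  induction f generalizing pre l with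
  | zero => simp [rkwvPairs]
  | succ f ih =>
    match l with
    | [] => simp [rkwvPairs]
    | c :: rest =>
      have hp : ¬ key.isPrefixOf (c :: rest) := by
        intro hc
        exact h 0 (by simpa using List.isPrefixOf_iff_prefix.mp hc)
      simp only [rkwvPairs, if_neg hp]
      exact ih (pre ++ [c]) rest (fun p => by simpa using h (p + 1))

theorem rkwv_skip (key : List Char) (hk : key ≠ []) (f p : Nat) (l pre : List Char)
    (hf : l.length ≤ f) (hocc : key <+: l.drop p) (hmin : ∀ q < p, ¬ key <+: l.drop q) :
    rkwvPairs key f pre l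
      = (pre ++ l.take p, l.drop (p + key.length)) ::
          rkwvPairs key ((l.drop (p + key.length)).length)
            (pre ++ l.take p ++ key) (l.drop (p + key.length)) := by
  induction p generalizing l pre f with
  | zero =>
    simp only [List.drop_zero] at hocc
    match l with
    | [] =>
      exact absurd (List.prefix_nil.mp hocc) hk
    | c :: rest =>
      have hkl : 1 ≤ key.length := Nat.one_le_iff_ne_zero.mpr (by simpa using hk)
      obtain ⟨f', rfl⟩ : ∃ f', f = f' + 1 := by
        cases f with
        | zero => simp at hf
        | succ f' => exact ⟨f', rfl⟩
      have hp : key.isPrefixOf (c :: rest) := List.isPrefixOf_iff_prefix.mpr hocc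
      simp only [rkwvPairs, if_pos hp]
      simp only [List.take_zero, List.append_nil, Nat.zero_add]
      rw [rkwv_pairs_fuel key hk f' (((c :: rest).drop key.length).length) (pre ++ key)
        ((c :: rest).drop key.length) (by simp at hf ⊢; omega) le_rfl]
  | succ p ihp =>
    match l with
    | [] =>
      rw [List.drop_nil] at hocc
      exact absurd (List.prefix_nil.mp hocc) hk
    | c :: rest =>
      obtain ⟨f', rfl⟩ : ∃ f', f = f' + 1 := by
        cases f with
        | zero => simp at hf
        | succ f' => exact ⟨f', rfl⟩
      have hp : ¬ key.isPrefixOf (c :: rest) := by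
        intro hc
        exact hmin 0 (Nat.succ_pos p) (by simpa using List.isPrefixOf_iff_prefix.mp hc)
      simp only [rkwvPairs, if_neg hp]
      have := ihp f' rest (pre ++ [c])
        (by simp only [List.length_cons] at hf; omega)
        (by simpa [List.drop_succ_cons] using hocc)
        (fun q hq => by simpa [List.drop_succ_cons] using hmin (q + 1) (by omega))
      rw [this]
      simp [List.append_assoc, Nat.succ_add]

theorem rkwv_take_key (key l : List Char) (i : Nat) (h : key <+: l.drop i) :
    l.take (i + key.length) = l.take i ++ key := by
  obtain ⟨t, ht⟩ := h
  rw [List.take_add, ← ht]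
  simp

theorem rkwv_pyRange_nil (a b : Int) (h : b ≤ a) : PySem.List.pyRange a b 1 = [] := by
  simp only [PySem.List.pyRange]
  rw [if_neg (by omega)]
  simp [if_neg (by omega : ¬ a < b)]

theorem rkwv_pyRange_map (a b : Nat) :
    PySem.List.pyRange (a : Int) (b : Int) 1 = (List.range' a (b - a)).map (fun j : Nat => (j : Int)) := by
  by_cases hab : a < b
  · obtain ⟨n, rfl⟩ : ∃ n, b = a + n := ⟨b - a, by omega⟩
    clear hab
    induction n generalizing a with
    | zero => simp [rkwv_pyRange_nil _ _ le_rfl]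
    | succ n ih =>
      have e : a + (n + 1) = (a + 1) + n := by omega
      rw [e, PySem.List.pyRange_one_cons (by omega)]
      rw [show ((a : Int) + 1) = ((a + 1 : Nat) : Int) by omega, ih (a + 1)]
      rw [show (a + 1) + n - a = n + 1 by omega, show (a + 1) + n - (a + 1) = n by omega]
      simp [List.range'_succ]
  · rw [rkwv_pyRange_nil _ _ (by omega), show b - a = 0 by omega]
    simp

theorem rkwv_pyRange_one (b : Nat) :
    PySem.List.pyRange 1 (b : Int) 1 = (List.range' 1 (b - 1)).map (fun j : Nat => (j : Int)) := by
  simpa using rkwv_pyRange_map 1 b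

theorem rkwv_bmain (s key value : List Char) (hk : key ≠ []) :
    ∀ (d m : Nat), s.length - m ≤ d → m ≤ s.length → ∀ (fuel : Nat), s.length + 1 - m ≤ fuel →
      ∀ (acc : PySem.Set (String × String)),
      rkwvGo s key value fuel (PySem.Chars.findFrom s key (m : Int)) acc
        = (rkwvPairs key ((s.drop m).length) (s.take m) (s.drop m)).foldl
            (fun a p => PySem.Set.add a (rkwvMkP value p)) acc := by
  intro d
  induction d with
  | zero =>
    intro m hd hm fuel hfuel acc
    have hms : m = s.length := by omega
    subst hms
    obtain ⟨f', rfl⟩ : ∃ f', fuel = f' + 1 := by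
      cases fuel with
      | zero => omega
      | succ f' => exact ⟨f', rfl⟩
    have hfind : PySem.Chars.findFrom s key (s.length : Int) = -1 := by
      rw [PySem.Chars.findFrom_natCast_eq_neg_one_iff s key s.length le_rfl]
      simp only [List.drop_length]
      intro hinf
      exact hk (List.eq_nil_of_infix_nil hinf)
    rw [hfind]
    simp [rkwvGo, rkwv_pairs_nil_l]
  | succ d ih =>
    intro m hd hm fuel hfuel acc
    obtain ⟨f', rfl⟩ : ∃ f', fuel = f' + 1 := by
      cases fuel with
      | zero => omega
      | succ f' => exact ⟨f', rfl⟩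
    by_cases hfind : PySem.Chars.findFrom s key (m : Int) = -1
    · -- no further occurrence: both sides are acc
      rw [hfind]
      have hnocc : ¬ key <:+: s.drop m :=
        (PySem.Chars.findFrom_natCast_eq_neg_one_iff s key m hm).mp hfind
      have hno : ∀ p, ¬ key <+: (s.drop m).drop p := by
        intro p hp
        have : PySem.Chars.isIn key (s.drop m) = true :=
          (PySem.Chars.exists_prefix_drop_iff_isIn key (s.drop m)).mp ⟨p, hp⟩
        exact hnocc (PySem.Chars.isIn_iff_infix key (s.drop m) |>.mp this)
      rw [rkwv_pairs_no_occ key _ _ _ hno]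
      simp [rkwvGo]
    · obtain ⟨hge, hocc, hmin⟩ := PySem.Chars.findFrom_natCast_spec s key m hm hfind
      set iZ := PySem.Chars.findFrom s key (m : Int) with hiZ
      have hiZ0 : 0 ≤ iZ := le_trans (by exact_mod_cast Int.natCast_nonneg m) hge
      set i := iZ.toNat with hidef
      have hiZi : iZ = (i : Int) := (Int.toNat_of_nonneg hiZ0).symm
      have hmi : m ≤ i := by omega
      have hkl : 1 ≤ key.length := Nat.one_le_iff_ne_zero.mpr (by simpa using hk)
      have hik : i + key.length ≤ s.length := by
        have := hocc.length_le
        simp [List.length_drop] at this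
        omega
      -- reduce one step of the loop
      rw [hiZi]
      simp only [rkwvGo, if_neg (show ¬ ((i : Int) = -1) by omega)]
      -- rewrite slices
      rw [PySem.List.slice_to s (by positivity), PySem.List.slice_from s (by positivity)]
      have hcast : (i : Int) + (key.length : Int) = ((i + key.length : Nat) : Int) := by push_cast; ring
      rw [hcast]
      rw [Int.toNat_natCast]
      -- recursive call via ih
      rw [ih (i + key.length) (by omega) (by omega) f' (by omega)]
      -- right-hand side: peel the first occurrence with rkwv_skip
      have hocc' : key <+: (s.drop m).drop (i - m) := by
        rw [List.drop_drop, show m + (i - m) = i by omega]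
        exact hocc
      have hmin' : ∀ q < i - m, ¬ key <+: (s.drop m).drop q := by
        intro q hq
        rw [List.drop_drop]
        exact hmin (m + q) (by omega) (by omega)
      rw [rkwv_skip key hk ((s.drop m).length) (i - m) (s.drop m) (s.take m) le_rfl hocc' hmin']
      simp only [List.foldl_cons]
      have e1 : s.take m ++ (s.drop m).take (i - m) = s.take i := by
        rw [← List.take_add, show m + (i - m) = i by omega]
      have e2 : (s.drop m).drop ((i - m) + key.length) = s.drop (i + key.length) := by
        rw [List.drop_drop, show m + ((i - m) + key.length) = i + key.length by omega]
      rw [e1, e2, rkwv_take_key key s i hocc]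
      have e4 : ((i : Int) + (key.length : Int)).toNat = i + key.length := by omega
      simp [rkwvMkP, e4]

-- ===== VERDICT (by name: the statement is the Claim_ definition above) =====
theorem replaceKeyWithValueAll_spec : Claim_equal_replaceKeyWithValueAll := by
  intro s key value _hdom hpre
  show replaceKeyWithValueAll s key value = replaceKeyWithValueAll_alt s key value
  have hk : key.toList ≠ [] := fun h => hpre (String.toList_eq_nil_iff.mp h)
  -- B side: the find loop folds the pair stream
  have HB := rkwv_bmain s.toList key.toList value.toList hk s.toList.length 0
    (by omega) (by omega) (s.toList.length + 1) (by omega) ([] : PySem.Set (String × String))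
  simp only [Nat.cast_zero, List.drop_zero, List.take_zero] at HB
  have hB : replaceKeyWithValueAll_alt s key value
      = (rkwvPairs key.toList (s.toList.length + 1) [] s.toList).foldl
          (fun a p => PySem.Set.add a (rkwvMkP value.toList p)) [] := by
    rw [replaceKeyWithValueAll_alt, if_neg hpre, ← PySem.Chars.findFrom_zero, HB,
      rkwv_pairs_fuel key.toList hk s.toList.length (s.toList.length + 1) [] s.toList
        le_rfl (by omega)]
  rw [hB, rkwv_link key.toList (s.toList.length + 1) s.toList []]
  -- A side
  rw [replaceKeyWithValueAll,
    show PySem.Chars.split? s.toList key.toList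
        = some (PySem.Chars.splitOn s.toList key.toList) by
      simp [PySem.Chars.split?, hk],
    rkwv_splitOn_eq]
  dsimp only
  by_cases h1 : 1 < (rkwvSegs key.toList (s.toList.length + 1) s.toList).length
  · rw [if_pos h1, List.foldl_map,
      rkwv_pyRange_one (rkwvSegs key.toList (s.toList.length + 1) s.toList).length,
      List.foldl_map]
    congr 1
    funext acc j
    rw [PySem.List.slice_to _ (by positivity), PySem.List.slice_from _ (by positivity),
      Int.toNat_natCast]
    simp [rkwvMkP]
  · rw [if_neg h1]
    have h0 : (rkwvSegs key.toList (s.toList.length + 1) s.toList).length - 1 = 0 := by omega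
    rw [h0]
    simp
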